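-- pv_equiv track=rewrite | github.com/Reemostat/Rl_Multi_Agent_Code_Optimizer | experiments/dataset/sample_493.py | parse_logs_7
-- ===== SOURCE A (Python) =====
-- def parse_logs_7(log_lines):
--     errors = []
--     warnings = []
--     for line in log_lines:
--         if "ERROR" in line:
--             errors.append(line)
--         elif "WARNING" in line:
--             warnings.append(line)
--     return errors, warnings
-- ===== SOURCE B (Python) =====
-- def parse_logs_7(log_lines):
--     errors = [l for l in log_lines if "ERROR" in l]
--     warnings = [l for l in log_lines if "WARNING" in l and "ERROR" not in l]
--     return errors, warnings
-- ===== Notes on version B (the rewrite author's own statement) =====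
-- stated objective: idiomatic
-- what changed: Replaces the single interleaved branch-per-line loop with two independent filtering passes (list comprehensions), the second encoding the elif exclusion as 'ERROR' not in l.
import Mathlib
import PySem

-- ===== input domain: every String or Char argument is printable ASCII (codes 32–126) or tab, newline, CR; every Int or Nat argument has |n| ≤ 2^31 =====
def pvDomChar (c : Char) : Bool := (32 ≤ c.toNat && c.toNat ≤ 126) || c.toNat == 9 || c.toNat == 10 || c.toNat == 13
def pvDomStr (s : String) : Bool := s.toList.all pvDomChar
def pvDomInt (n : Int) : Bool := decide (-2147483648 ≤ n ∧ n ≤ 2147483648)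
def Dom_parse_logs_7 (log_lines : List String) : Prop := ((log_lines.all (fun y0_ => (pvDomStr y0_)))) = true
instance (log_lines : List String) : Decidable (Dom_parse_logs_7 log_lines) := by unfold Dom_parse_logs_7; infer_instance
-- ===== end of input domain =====

-- ===== PORT A =====
-- One honest line: B replaces A's single interleaved loop by two independent filtering passes (idiomatic, same cost).
def parse_logs_7 (log_lines : List String) : List String × List String :=
  log_lines.foldl
    (fun acc line =>
      if PySem.Str.isIn "ERROR" line then (acc.1 ++ [line], acc.2)
      else if PySem.Str.isIn "WARNING" line then (acc.1, acc.2 ++ [line])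
      else acc)
    ([], [])

-- ===== PORT B =====
def parse_logs_7_alt (log_lines : List String) : List String × List String :=
  (log_lines.filter (fun l => PySem.Str.isIn "ERROR" l),
   log_lines.filter (fun l => PySem.Str.isIn "WARNING" l && !PySem.Str.isIn "ERROR" l))

-- ===== PRECONDITION & SPEC =====
def Spec_parse_logs_7 (log_lines : List String) (out : List String × List String) : Prop := out = parse_logs_7_alt log_lines
instance (log_lines : List String) (out : List String × List String) : Decidable (Spec_parse_logs_7 log_lines out) := by unfold Spec_parse_logs_7; infer_instance

-- ===== CLAIM (what is proved, stated in full; the proofs are below) =====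
def Claim_equal_parse_logs_7 : Prop := ∀ (log_lines : List String), Dom_parse_logs_7 log_lines → Spec_parse_logs_7 log_lines (parse_logs_7 log_lines)

-- ===== LEMMAS AND PROOFS =====

-- ===== VERDICT (by name: the statement is the Claim_ definition above) =====
lemma parse_logs_7_foldl (log_lines : List String) (e w : List String) :
    log_lines.foldl
      (fun acc line =>
        if PySem.Str.isIn "ERROR" line then (acc.1 ++ [line], acc.2)
        else if PySem.Str.isIn "WARNING" line then (acc.1, acc.2 ++ [line])
        else acc)
      (e, w)
    = (e ++ log_lines.filter (fun l => PySem.Str.isIn "ERROR" l),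
       w ++ log_lines.filter (fun l => PySem.Str.isIn "WARNING" l && !PySem.Str.isIn "ERROR" l)) := by
  induction log_lines generalizing e w with
  | nil => simp
  | cons x xs ih =>
    rw [List.foldl_cons, List.filter_cons, List.filter_cons]
    by_cases hE : PySem.Str.isIn "ERROR" x
    · rw [if_pos hE, ih]
      simp only [PySem.Str.isIn, show ("ERROR").toList = ['E','R','R','O','R'] from rfl,
        show ("WARNING").toList = ['W','A','R','N','I','N','G'] from rfl] at hE
      simp [hE]
    · rw [if_neg hE]
      by_cases hW : PySem.Str.isIn "WARNING" x
      · rw [if_pos hW, ih]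
        simp only [PySem.Str.isIn, show ("ERROR").toList = ['E','R','R','O','R'] from rfl,
          show ("WARNING").toList = ['W','A','R','N','I','N','G'] from rfl] at hE hW
        simp [hE, hW]
      · rw [if_neg hW, ih]
        simp only [PySem.Str.isIn, show ("ERROR").toList = ['E','R','R','O','R'] from rfl,
          show ("WARNING").toList = ['W','A','R','N','I','N','G'] from rfl] at hE hW
        simp [hE, hW]

theorem parse_logs_7_spec : Claim_equal_parse_logs_7 := by
  intro log_lines _
  unfold Spec_parse_logs_7 parse_logs_7 parse_logs_7_alt
  simpa using parse_logs_7_foldl log_lines [] []
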